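-- pv_equiv track=rewrite | github.com/znoel93/seating-chart-manager | exporter.py | _fit_name_to_seat_pdf
-- ===== SOURCE A (Python) =====
-- def _fit_name_to_seat_pdf(name: str) -> tuple:
--     """PDF counterpart to room_canvas._fit_name_to_seat. Returns
--     (display_text, font_pt, line_count). Seat radius in the PDF is 10pt
--     (smaller than the on-screen 16px canvas seat), so fonts are smaller:
--     6pt single, 5pt double."""
--     name = name.strip()
--     if len(name) <= 9:
--         return name, 6, 1
--     if " " in name:
--         words = name.split()
--         if len(words) == 2:
--             line1, line2 = words[0], words[1]
--         else:
--             best_split = 1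
--             best_diff  = float("inf")
--             for i in range(1, len(words)):
--                 left  = " ".join(words[:i])
--                 right = " ".join(words[i:])
--                 d = abs(len(left) - len(right))
--                 if d < best_diff:
--                     best_diff = d
--                     best_split = i
--             line1 = " ".join(words[:best_split])
--             line2 = " ".join(words[best_split:])
--         if len(line1) > 9:
--             line1 = line1[:8] + "…"
--         if len(line2) > 9:
--             line2 = line2[:8] + "…"
--         return f"{line1}\n{line2}", 5, 2
--     return name[:9] + "…", 6, 1
-- ===== SOURCE B (Python) =====
-- def _fit_name_to_seat_pdf(name: str) -> tuple:
--     """Same output as A; prefix-sum arithmetic replaces the per-split joins."""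
--     name = name.strip()
--     if len(name) <= 9:
--         return name, 6, 1
--     if " " not in name:
--         return name[:9] + "…", 6, 1
--     words = name.split()
--     if len(words) == 2:
--         line1, line2 = words
--     else:
--         n = len(words)
--         prefix = [0]
--         for w in words:
--             prefix.append(prefix[-1] + len(w))
--         total = prefix[n]
--         best = min(range(1, n), key=lambda i: abs(2 * (prefix[i] + i) - total - n))
--         line1 = " ".join(words[:best])
--         line2 = " ".join(words[best:])
--     if len(line1) > 9:
--         line1 = line1[:8] + "…"
--     if len(line2) > 9:
--         line2 = line2[:8] + "…"
--     return line1 + "\n" + line2, 5, 2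
-- ===== Notes on version B (the rewrite author's own statement) =====
-- stated objective: alternative
-- what changed: The per-candidate-split string joins (quadratic in the name length) are replaced by a prefix-sum table of word lengths and a single arithmetic min() over split indices; guards, the 2-word case, tie-breaking and truncation are unchanged.
import Mathlib
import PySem

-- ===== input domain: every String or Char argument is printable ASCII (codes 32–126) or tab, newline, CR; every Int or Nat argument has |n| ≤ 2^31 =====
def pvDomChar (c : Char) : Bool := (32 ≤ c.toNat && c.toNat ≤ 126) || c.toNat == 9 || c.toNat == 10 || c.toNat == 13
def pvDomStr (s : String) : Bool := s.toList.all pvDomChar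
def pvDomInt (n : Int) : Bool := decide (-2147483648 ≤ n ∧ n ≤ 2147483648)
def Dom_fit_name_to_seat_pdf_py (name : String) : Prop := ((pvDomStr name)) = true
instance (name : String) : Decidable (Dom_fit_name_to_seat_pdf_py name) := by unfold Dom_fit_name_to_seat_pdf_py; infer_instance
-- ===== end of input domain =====

-- B replaces A's join-per-candidate-split scan by a prefix-sum table of word lengths and a
-- single arithmetic min(); guards, 2-word case and truncation are unchanged (objective: alternative).

-- ===== PORT A =====
def fit_name_to_seat_pdf_py (name : String) : String × Int × Int :=
  let name := PySem.Str.strip name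
  if PySem.Str.len name ≤ 9 then (name, 6, 1)
  else if PySem.Str.isIn " " name then
    let words := PySem.Str.split₀ name
    let l12 :=
      if words.length = 2 then
        (PySem.List.pyGetD words 0 "", PySem.List.pyGetD words 1 "")
      else
        -- best_split loop: best_diff = inf encoded as `none`, best_split starts at 1
        let r := (PySem.List.pyRange 1 (words.length : Int)).foldl
          (fun acc i =>
            let left := PySem.Str.join " " (PySem.List.slice words none (some i))
            let right := PySem.Str.join " " (PySem.List.slice words (some i) none)
            let d : Int := |PySem.Str.len left - PySem.Str.len right|
            if (match acc.1 with | none => true | some b => decide (d < b)) then (some d, i)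
            else acc)
          ((none : Option Int), (1 : Int))
        (PySem.Str.join " " (PySem.List.slice words none (some r.2)),
         PySem.Str.join " " (PySem.List.slice words (some r.2) none))
    let line1 := if 9 < PySem.Str.len l12.1 then PySem.Str.slice l12.1 none (some 8) ++ "…" else l12.1
    let line2 := if 9 < PySem.Str.len l12.2 then PySem.Str.slice l12.2 none (some 8) ++ "…" else l12.2
    (line1 ++ "\n" ++ line2, 5, 2)
  else
    (PySem.Str.slice name none (some 9) ++ "…", 6, 1)

-- ===== PORT B =====
def fit_name_to_seat_pdf_py_alt (name : String) : String × Int × Int :=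
  let name := PySem.Str.strip name
  if PySem.Str.len name ≤ 9 then (name, 6, 1)
  else if PySem.Str.isIn " " name = false then
    (PySem.Str.slice name none (some 9) ++ "…", 6, 1)
  else
    let words := PySem.Str.split₀ name
    let l12 :=
      match words with
      | [a, b] => (a, b)   -- line1, line2 = words
      | _ =>
        let n : Int := words.length
        -- prefix[i] = total characters of the first i words
        let pre := words.foldl (fun p w => p ++ [PySem.List.pyGetD p (-1) 0 + PySem.Str.len w]) [(0 : Int)]
        let total := PySem.List.pyGetD pre n 0
        let best := (PySem.List.min? (PySem.List.pyRange 1 n)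
            (fun i => |2 * (PySem.List.pyGetD pre i 0 + i) - total - n|)).getD 1
        (PySem.Str.join " " (PySem.List.slice words none (some best)),
         PySem.Str.join " " (PySem.List.slice words (some best) none))
    let line1 := if 9 < PySem.Str.len l12.1 then PySem.Str.slice l12.1 none (some 8) ++ "…" else l12.1
    let line2 := if 9 < PySem.Str.len l12.2 then PySem.Str.slice l12.2 none (some 8) ++ "…" else l12.2
    (line1 ++ "\n" ++ line2, 5, 2)

-- ===== PRECONDITION & SPEC =====
def Spec_fit_name_to_seat_pdf_py (name : String) (out : String × Int × Int) : Prop := out = fit_name_to_seat_pdf_py_alt name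
instance (name : String) (out : String × Int × Int) : Decidable (Spec_fit_name_to_seat_pdf_py name out) := by unfold Spec_fit_name_to_seat_pdf_py; infer_instance

-- ===== CLAIM (what is proved, stated in full; the proofs are below) =====
def Claim_equal_fit_name_to_seat_pdf_py : Prop := ∀ (name : String), Dom_fit_name_to_seat_pdf_py name → Spec_fit_name_to_seat_pdf_py name (fit_name_to_seat_pdf_py name)

-- ===== LEMMAS AND PROOFS =====

-- running-minimum of f over l, starting candidate m (first minimum kept, as in Python)
def pvGm (f : Int → Int) (m : Int) : List Int → Int
  | [] => m
  | i :: l => pvGm f (if f i < f m then i else m) l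

-- structural prefix-sum list: pvPax a ws = [a, a + |w₀|, a + |w₀| + |w₁|, …]
def pvPax (a : Int) : List String → List Int
  | [] => [a]
  | w :: t => a :: pvPax (a + PySem.Str.len w) t

lemma pvMin?_cons (f : Int → Int) (i : Int) (l : List Int) :
    PySem.List.min? (i :: l) f = some (pvGm f i l) := by
  induction l generalizing i with
  | nil => simp [PySem.List.min?, pvGm]
  | cons j l ih =>
    have h1 : PySem.List.min? (i :: j :: l) f
        = PySem.List.min? ((if f j < f i then j else i) :: l) f := by
      by_cases h : f j < f i <;> simp [PySem.List.min?, h]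
    rw [h1, ih]
    simp [pvGm]

lemma pvScanfold (f : Int → Int) (l : List Int) (m : Int) :
    l.foldl (fun acc i =>
        if (match acc.1 with | none => true | some b => decide (f i < b)) then (some (f i), i)
        else acc) ((some (f m) : Option Int), m)
      = (some (f (pvGm f m l)), pvGm f m l) := by
  induction l generalizing m with
  | nil => rfl
  | cons i l ih =>
    simp only [List.foldl_cons, pvGm]
    by_cases h : f i < f m <;> simp [h, ih]

lemma pvLoopEq (fA fB : Int → Int) (n : Int)
    (h : ∀ i ∈ PySem.List.pyRange 1 n, fA i = fB i) :
    ((PySem.List.pyRange 1 n).foldl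
      (fun acc i =>
        if (match acc.1 with | none => true | some b => decide (fA i < b)) then (some (fA i), i)
        else acc) ((none : Option Int), (1 : Int))).2
    = (PySem.List.min? (PySem.List.pyRange 1 n) fB).getD 1 := by
  rw [PySem.List.foldl_congr_mem _ _
      (fun acc i =>
        if (match acc.1 with | none => true | some b => decide (fB i < b)) then (some (fB i), i)
        else acc) _ (by intro acc x hx; rw [h x hx])]
  by_cases hn : 1 < n
  · rw [PySem.List.pyRange_one_cons hn, pvMin?_cons]
    simp only [List.foldl_cons, if_true, Option.getD_some]
    rw [pvScanfold fB _ 1]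
  · have hnil : PySem.List.pyRange 1 n = [] := by
      rw [List.eq_nil_iff_forall_not_mem]
      intro x hx
      rw [PySem.List.mem_pyRange_one] at hx
      omega
    simp [hnil, PySem.List.min?]

lemma pvInterLen (l : List (List Char)) (h : l ≠ []) :
    ((List.intercalate [' '] l).length : Int)
      = (l.map (fun c => (c.length : Int))).sum + l.length - 1 := by
  induction l with
  | nil => exact absurd rfl h
  | cons a t ih =>
    cases t with
    | nil => simp [List.intercalate]
    | cons b t' =>
      have ht : (b :: t') ≠ [] := by simp
      have hrec := ih ht
      have hstep : List.intercalate [' '] (a :: b :: t') = a ++ [' '] ++ List.intercalate [' '] (b :: t') := by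
        simp [List.intercalate, List.intersperse]
      rw [hstep]
      simp only [List.length_append, List.map_cons, List.sum_cons, List.length_cons,
        List.length_nil]
      simp only [List.map_cons, List.sum_cons, List.length_cons] at hrec
      push_cast
      push_cast at hrec
      omega

lemma pvJoinLen (parts : List String) (h : parts ≠ []) :
    PySem.Str.len (PySem.Str.join " " parts)
      = (parts.map (fun w => (w.toList.length : Int))).sum + parts.length - 1 := by
  have hmap : parts.map String.toList ≠ [] := by simpa using h
  have hsep : (" " : String).toList = [' '] := by decide
  simp only [PySem.Str.len_eq, PySem.Str.join, PySem.Chars.join, String.toList_ofList]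
  rw [hsep, pvInterLen _ hmap]
  simp [List.map_map, Function.comp_def]

lemma pvPax_length (a : Int) (t : List String) : (pvPax a t).length = t.length + 1 := by
  induction t generalizing a with
  | nil => rfl
  | cons w t ih => simp [pvPax, ih]

lemma pvPax_getD (t : List String) (a : Int) (k : Nat) (hk : k ≤ t.length) :
    (pvPax a t).getD k 0 = a + ((t.take k).map (fun w => (w.toList.length : Int))).sum := by
  induction t generalizing a k with
  | nil =>
    have hk0 : k = 0 := by simpa using hk
    subst hk0
    simp [pvPax]
  | cons w t ih =>
    cases k with
    | zero => simp [pvPax]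
    | succ k' =>
      simp only [pvPax, List.getD_cons_succ, List.take_succ_cons, List.map_cons, List.sum_cons]
      rw [ih _ k' (by simpa using hk)]
      rw [PySem.Str.len_eq]
      ring

lemma pvFoldPre (ws : List String) :
    ws.foldl (fun p w => p ++ [PySem.List.pyGetD p (-1) 0 + PySem.Str.len w]) [(0 : Int)]
      = pvPax 0 ws := by
  suffices h : ∀ (t : List String) (p : List Int) (a : Int),
      t.foldl (fun p w => p ++ [PySem.List.pyGetD p (-1) 0 + PySem.Str.len w]) (p ++ [a])
        = p ++ pvPax a t by
    simpa using h ws [] 0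
  intro t
  induction t with
  | nil => intro p a; simp [pvPax]
  | cons w t ih =>
    intro p a
    simp only [List.foldl_cons, PySem.List.pyGetD_neg_one_append_singleton, pvPax]
    have : p ++ [a] ++ [a + PySem.Str.len w] = (p ++ [a]) ++ [a + PySem.Str.len w] := by simp
    rw [this, ih (p ++ [a]) (a + PySem.Str.len w)]
    simp

-- the two candidate keys agree on every admissible split index
lemma pvKeyEq (ws : List String) (i : Int) (hi : i ∈ PySem.List.pyRange 1 (ws.length : Int)) :
    |PySem.Str.len (PySem.Str.join " " (PySem.List.slice ws none (some i))) -
      PySem.Str.len (PySem.Str.join " " (PySem.List.slice ws (some i) none))|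
    = |2 * (PySem.List.pyGetD
          (ws.foldl (fun p w => p ++ [PySem.List.pyGetD p (-1) 0 + PySem.Str.len w]) [(0 : Int)]) i 0 + i)
        - PySem.List.pyGetD
            (ws.foldl (fun p w => p ++ [PySem.List.pyGetD p (-1) 0 + PySem.Str.len w]) [(0 : Int)])
            (ws.length : Int) 0
        - (ws.length : Int)| := by
  rw [PySem.List.mem_pyRange_one] at hi
  obtain ⟨h1, h2⟩ := hi
  have h0 : (0 : Int) ≤ i := by omega
  have hkn : i.toNat < ws.length := by omega
  have hkn' : i.toNat ≤ ws.length := by omega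
  rw [pvFoldPre]
  -- slices
  rw [PySem.List.slice_to ws h0, PySem.List.slice_from ws h0]
  -- the two pyGetD lookups into the prefix table
  have hlen : (pvPax 0 ws).length = ws.length + 1 := pvPax_length 0 ws
  have hg1 : PySem.List.pyGetD (pvPax 0 ws) i 0
      = ((ws.take i.toNat).map (fun w => (w.toList.length : Int))).sum := by
    have hi' : i = ((i.toNat : Nat) : Int) := by omega
    conv_lhs => rw [hi', PySem.List.pyGetD_natCast]
    rw [pvPax_getD ws 0 i.toNat hkn']
    simp
  have hg2 : PySem.List.pyGetD (pvPax 0 ws) (ws.length : Int) 0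
      = (ws.map (fun w => (w.toList.length : Int))).sum := by
    rw [PySem.List.pyGetD_natCast, pvPax_getD ws 0 ws.length (le_refl _)]
    simp
  rw [hg1, hg2]
  -- join lengths
  have htake_ne : ws.take i.toNat ≠ [] := by
    have : (ws.take i.toNat).length = i.toNat := by
      rw [List.length_take]; omega
    intro hc; rw [hc] at this; simp at this; omega
  have hdrop_ne : ws.drop i.toNat ≠ [] := by
    have : (ws.drop i.toNat).length = ws.length - i.toNat := by simp
    intro hc; rw [hc] at this; simp at this; omega
  rw [pvJoinLen _ htake_ne, pvJoinLen _ hdrop_ne]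
  -- split the total sum at i
  have hsplit : (ws.map (fun w => (w.toList.length : Int))).sum
      = ((ws.take i.toNat).map (fun w => (w.toList.length : Int))).sum
        + ((ws.drop i.toNat).map (fun w => (w.toList.length : Int))).sum := by
    conv_lhs => rw [← List.take_append_drop i.toNat ws]
    simp
  have hlt : ((ws.take i.toNat).length : Int) = i := by
    rw [List.length_take]; push_cast; omega
  have hld : ((ws.drop i.toNat).length : Int) = (ws.length : Int) - i := by
    simp [List.length_drop]; omega
  rw [hlt, hld, hsplit]
  congr 1
  ring

-- the selected split index is the same in both ports
lemma pvBestEq (ws : List String) :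
    ((PySem.List.pyRange 1 (ws.length : Int)).foldl
      (fun acc i =>
        let left := PySem.Str.join " " (PySem.List.slice ws none (some i))
        let right := PySem.Str.join " " (PySem.List.slice ws (some i) none)
        let d : Int := |PySem.Str.len left - PySem.Str.len right|
        if (match acc.1 with | none => true | some b => decide (d < b)) then (some d, i)
        else acc) ((none : Option Int), (1 : Int))).2
    = (PySem.List.min? (PySem.List.pyRange 1 (ws.length : Int))
        (fun i => |2 * (PySem.List.pyGetD
            (ws.foldl (fun p w => p ++ [PySem.List.pyGetD p (-1) 0 + PySem.Str.len w]) [(0 : Int)]) i 0 + i)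
          - PySem.List.pyGetD
              (ws.foldl (fun p w => p ++ [PySem.List.pyGetD p (-1) 0 + PySem.Str.len w]) [(0 : Int)])
              (ws.length : Int) 0
          - (ws.length : Int)|)).getD 1 :=
  pvLoopEq _ _ _ (fun i hi => pvKeyEq ws i hi)

-- ===== VERDICT (by name: the statement is the Claim_ definition above) =====
set_option maxHeartbeats 1000000 in
theorem fit_name_to_seat_pdf_py_spec : Claim_equal_fit_name_to_seat_pdf_py := by
  intro name _
  unfold Spec_fit_name_to_seat_pdf_py fit_name_to_seat_pdf_py fit_name_to_seat_pdf_py_alt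
  by_cases h1 : PySem.Str.len (PySem.Str.strip name) ≤ 9
  · rw [if_pos h1, if_pos h1]
  · rw [if_neg h1, if_neg h1]
    cases h2 : PySem.Str.isIn " " (PySem.Str.strip name) with
    | false => rw [if_neg (by simp), if_pos (by simp)]
    | true =>
      rw [if_pos (by simp), if_neg (by simp)]
      rcases hw : PySem.Str.split₀ (PySem.Str.strip name) with _ | ⟨a, _ | ⟨b, _ | ⟨c, t⟩⟩⟩
      · simp [PySem.List.min?]
      · simp [PySem.List.min?]
      · simp [PySem.List.pyGetD]
      · have hne : ((a :: b :: c :: t).length = 2) = False := by simp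
        simp only [hne, if_false]
        rw [pvBestEq (a :: b :: c :: t)]
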